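-- pv_equiv track=rewrite | github.com/treecy87/hsbc-data-cleaner | src/hsbc_data_cleaner/cleaning/deduplicate.py | _find_previous_quarter
-- ===== SOURCE A (Python) =====
-- from typing import Dict, Iterable, List, Optional, Tuple
--
-- def _find_previous_quarter(
--     fund_entry: Dict[str, Dict[str, Dict[str, str]]],
--     quarter: str,
-- ) -> Tuple[Optional[str], Optional[Dict[str, Dict[str, str]]]]:
--     available = [q for q in fund_entry.keys() if q != quarter]
--     if not available:
--         return None, None
--     try:
--         sorted_quarters = sorted(available)
--     except TypeError:
--         sorted_quarters = available
--     prev_quarter = sorted_quarters[-1]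
--     return prev_quarter, fund_entry.get(prev_quarter)
-- ===== SOURCE B (Python) =====
-- def _find_previous_quarter(fund_entry, quarter):
--     # One pass over the items carrying the (key, value) pair of the running
--     # maximum key != quarter: no sort and no final dict lookup.
--     best = None
--     for q, data in fund_entry.items():
--         if q != quarter and (best is None or best[0] < q):
--             best = (q, data)
--     if best is None:
--         return None, None
--     return best
-- ===== Notes on version B (the rewrite author's own statement) =====
-- stated objective: alternative
-- what changed: Replaces sort-the-remaining-keys, take-last, then dict.get with a single pass over the items that carries the (key, value) pair of the running maximum non-quarter key, so both the O(n log n) sort and the final lookup disappear.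
import Mathlib
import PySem

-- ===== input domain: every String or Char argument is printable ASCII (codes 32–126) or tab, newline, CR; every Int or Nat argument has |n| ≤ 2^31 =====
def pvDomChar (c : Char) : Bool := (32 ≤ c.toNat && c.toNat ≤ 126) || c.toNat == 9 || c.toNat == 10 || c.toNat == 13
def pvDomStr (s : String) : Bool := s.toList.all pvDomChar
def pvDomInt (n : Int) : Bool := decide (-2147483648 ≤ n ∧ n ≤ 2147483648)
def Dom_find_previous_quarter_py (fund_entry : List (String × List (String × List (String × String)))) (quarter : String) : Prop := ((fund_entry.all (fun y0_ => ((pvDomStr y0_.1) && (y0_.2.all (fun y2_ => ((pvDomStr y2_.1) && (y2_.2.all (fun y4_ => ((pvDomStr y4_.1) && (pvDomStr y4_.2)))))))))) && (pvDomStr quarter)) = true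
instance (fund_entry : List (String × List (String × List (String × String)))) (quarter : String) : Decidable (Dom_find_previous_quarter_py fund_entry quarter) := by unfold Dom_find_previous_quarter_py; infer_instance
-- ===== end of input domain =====

-- B replaces A's filter/sort/take-last/dict.get pipeline by a single pass over the items
-- that carries the (key, value) pair of the running maximum non-quarter key (alternative algorithm).

-- ===== PORT A =====
-- available = [q for q in fund_entry.keys() if q != quarter]; if not available: return None, None;
-- sorted_quarters = sorted(available)  (the except TypeError branch is unreachable: string keys always compare);
-- prev = sorted_quarters[-1]; return prev, fund_entry.get(prev)  (dict.get = first match in the assoc list)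
def find_previous_quarter_py (fund_entry : List (String × List (String × List (String × String)))) (quarter : String) : Option String × (Option (List (String × List (String × String)))) :=
  let available := (fund_entry.map Prod.fst).filter (fun q => q ≠ quarter)
  if available.isEmpty then (none, none)
  else
    let sorted_quarters := PySem.List.sorted available (fun x => x) false
    match PySem.List.pyGet? sorted_quarters (-1) with
    | none => (none, none)  -- unreachable: available is nonempty
    | some prev => (some prev, (fund_entry.find? (fun p => p.1 == prev)).map Prod.snd)

-- ===== PORT B =====
-- best = None; for (q, data) in items: if q != quarter and (best is None or best[0] < q): best = (q, data);
-- return best (or (None, None))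
def find_previous_quarter_py_alt (fund_entry : List (String × List (String × List (String × String)))) (quarter : String) : Option String × (Option (List (String × List (String × String)))) :=
  match fund_entry.foldl (fun best p =>
      if p.1 = quarter then best
      else match best with
        | none => some p
        | some b => if b.1 < p.1 then some p else best) none with
  | none => (none, none)
  | some b => (some b.1, some b.2)

-- ===== PRECONDITION & SPEC =====
def Spec_find_previous_quarter_py (fund_entry : List (String × List (String × List (String × String)))) (quarter : String) (out : Option String × (Option (List (String × List (String × String))))) : Prop := out = find_previous_quarter_py_alt fund_entry quarter
instance (fund_entry : List (String × List (String × List (String × String)))) (quarter : String) (out : Option String × (Option (List (String × List (String × String))))) : Decidable (Spec_find_previous_quarter_py fund_entry quarter out) := by unfold Spec_find_previous_quarter_py; infer_instance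

-- ===== CLAIM (what is proved, stated in full; the proofs are below) =====
def Claim_equal_find_previous_quarter_py : Prop := ∀ (fund_entry : List (String × List (String × List (String × String)))) (quarter : String), Dom_find_previous_quarter_py fund_entry quarter → Spec_find_previous_quarter_py fund_entry quarter (find_previous_quarter_py fund_entry quarter)

-- ===== LEMMAS AND PROOFS =====

-- abbreviation used only by the proofs: B's loop body
def pvStep (quarter : String) : Option (String × List (String × List (String × String))) → (String × List (String × List (String × String))) → Option (String × List (String × List (String × String))) :=
  fun best p =>
    if p.1 = quarter then best
    else match best with
      | none => some p
      | some b => if b.1 < p.1 then some p else best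

-- the key of B's fold is the running max over the filtered keys
theorem pv_key_of_fold (quarter : String) (l : List (String × List (String × List (String × String)))) :
    ∀ acc : Option (String × List (String × List (String × String))),
    (l.foldl (pvStep quarter) acc).map Prod.fst
    = ((l.map Prod.fst).filter (fun q => q ≠ quarter)).foldl (fun a q => match a with
        | none => some q
        | some b => if b < q then some q else a) (acc.map Prod.fst) := by
  induction l with
  | nil => intro acc; rfl
  | cons p l ih =>
      intro acc
      simp only [List.foldl_cons, List.map_cons, List.filter_cons]
      by_cases h : p.1 = quarter
      · rw [if_neg (by simp [h]), ih]
        congr 1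
        simp [pvStep, h]
      · rw [if_pos (by simp [h]), List.foldl_cons, ih]
        congr 1
        cases acc with
        | none => simp [pvStep, h]
        | some b =>
            simp only [pvStep, if_neg h, Option.map_some]
            by_cases hb : b.1 < p.1 <;> simp [hb]

-- key-only fold seeded with `some b` is the running max
theorem pv_fold_some (t : List String) : ∀ b : String,
    t.foldl (fun a q => match a with
      | none => some q
      | some b => if b < q then some q else a) (some b) = some (t.foldl max b) := by
  induction t with
  | nil => intro b; rfl
  | cons q t ih =>
      intro b
      simp only [List.foldl_cons]
      by_cases h : b < q
      · rw [show (if b < q then some q else some b) = some q from by rw [if_pos h]]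
        rw [ih q, max_eq_right (le_of_lt h)]
      · rw [show (if b < q then some q else some b) = some b from by rw [if_neg h]]
        rw [ih b, max_eq_left (not_lt.mp h)]

-- the value carried by B's fold is the one dict.get would find
theorem pv_val_of_fold (quarter : String) (t : List (String × List (String × List (String × String)))) :
    ∀ (b : String × List (String × List (String × String))) (m : String × List (String × List (String × String))),
    t.foldl (pvStep quarter) (some b) = some m →
    (m = b) ∨ (b.1 < m.1 ∧ m.1 ≠ quarter ∧ t.find? (fun p => p.1 == m.1) = some m) := by
  induction t with
  | nil =>
      intro b m h
      left; exact (Option.some.injEq _ _ ▸ h).symm ▸ rfl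
  | cons p t ih =>
      intro b m h
      simp only [List.foldl_cons] at h
      by_cases hq : p.1 = quarter
      · rw [show pvStep quarter (some b) p = some b from by simp [pvStep, hq]] at h
        rcases ih b m h with h1 | ⟨h1, h2, h3⟩
        · left; exact h1
        · right
          refine ⟨h1, h2, ?_⟩
          rw [List.find?_cons_of_neg (by simp [hq]; intro he; exact h2 (he ▸ hq ▸ rfl))]
          exact h3
      · by_cases hlt : b.1 < p.1
        · rw [show pvStep quarter (some b) p = some p from by simp [pvStep, hq, hlt]] at h
          rcases ih p m h with h1 | ⟨h1, h2, h3⟩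
          · right
            refine ⟨h1 ▸ hlt, h1 ▸ hq, ?_⟩
            rw [List.find?_cons_of_pos (by simp [h1])]
            exact congrArg some h1.symm ▸ rfl
          · right
            refine ⟨lt_trans hlt h1, h2, ?_⟩
            rw [List.find?_cons_of_neg (by simp; intro he; exact absurd (he ▸ h1) (lt_irrefl _))]
            exact h3
        · rw [show pvStep quarter (some b) p = some b from by simp [pvStep, hq, hlt]] at h
          rcases ih b m h with h1 | ⟨h1, h2, h3⟩
          · left; exact h1
          · right
            refine ⟨h1, h2, ?_⟩
            rw [List.find?_cons_of_neg (by simp; intro he; exact hlt (he ▸ h1))]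
            exact h3

-- from the empty seed: the carried pair is exactly the first-match lookup of its key
theorem pv_val_of_fold_none (quarter : String) (l : List (String × List (String × List (String × String)))) :
    ∀ (m : String × List (String × List (String × String))),
    l.foldl (pvStep quarter) none = some m →
    m.1 ≠ quarter ∧ l.find? (fun p => p.1 == m.1) = some m := by
  induction l with
  | nil => intro m h; exact absurd h (by simp)
  | cons p l ih =>
      intro m h
      simp only [List.foldl_cons] at h
      by_cases hq : p.1 = quarter
      · rw [show pvStep quarter none p = none from by simp [pvStep, hq]] at h
        rcases ih m h with ⟨h1, h2⟩
        refine ⟨h1, ?_⟩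
        rw [List.find?_cons_of_neg (by simp [hq]; intro he; exact h1 (he ▸ hq ▸ rfl))]
        exact h2
      · rw [show pvStep quarter none p = some p from by simp [pvStep, hq]] at h
        rcases pv_val_of_fold quarter l p m h with h1 | ⟨h1, h2, h3⟩
        · refine ⟨h1 ▸ hq, ?_⟩
          rw [List.find?_cons_of_pos (by simp [h1])]
          exact congrArg some h1.symm ▸ rfl
        · refine ⟨h2, ?_⟩
          rw [List.find?_cons_of_neg (by simp; intro he; exact absurd (he ▸ h1) (lt_irrefl _))]
          exact h3

-- in a ≤-pairwise nonempty list every member is ≤ the last element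
theorem pv_mem_le_getLast : ∀ (s : List String) (hne : s ≠ []), s.Pairwise (· ≤ ·) →
    ∀ y ∈ s, y ≤ s.getLast hne := by
  intro s
  induction s with
  | nil => intro hne; exact absurd rfl hne
  | cons a s ih =>
      intro hne hpw y hy
      rcases List.pairwise_cons.mp hpw with ⟨ha, hpw'⟩
      by_cases hsne : s = []
      · subst hsne; simp at hy; simp [hy, List.getLast]
      · rw [List.getLast_cons hsne]
        rcases List.mem_cons.mp hy with rfl | hy'
        · exact ha _ (List.getLast_mem hsne)
        · exact ih hsne hpw' y hy'

-- the last element of sorted(xs) (id key) is the running max of xs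
theorem pv_sorted_getLast? (h : String) (t : List String) :
    (PySem.List.sorted (h :: t) (fun x => x) false).getLast? = some (t.foldl max h) := by
  have hperm := PySem.List.sorted_perm (h :: t) (fun x => x) false
  have hne : PySem.List.sorted (h :: t) (fun x => x) false ≠ [] := by
    intro hnil
    rw [PySem.List.sorted_eq_nil_iff] at hnil
    exact List.cons_ne_nil _ _ hnil
  rw [List.getLast?_eq_some_getLast hne]
  congr 1
  have hmem : (PySem.List.sorted (h :: t) (fun x => x) false).getLast hne ∈ h :: t :=
    hperm.mem_iff.mp (List.getLast_mem hne)
  have hmax_mem : t.foldl max h ∈ h :: t := by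
    rcases PySem.List.foldl_max_mem t h with h1 | h1
    · rw [h1]; exact List.mem_cons_self
    · exact List.mem_cons_of_mem _ h1
  have hpw : (PySem.List.sorted (h :: t) (fun x => x) false).Pairwise (· ≤ ·) :=
    PySem.List.sorted_pairwise (h :: t) (fun x => x)
  have h1 : t.foldl max h ≤ (PySem.List.sorted (h :: t) (fun x => x) false).getLast hne :=
    pv_mem_le_getLast _ hne hpw _ (hperm.mem_iff.mpr hmax_mem)
  have h2 : (PySem.List.sorted (h :: t) (fun x => x) false).getLast hne ≤ t.foldl max h := by
    rcases List.mem_cons.mp hmem with hh | hh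
    · rw [hh]; exact (PySem.List.le_foldl_max t h).1
    · exact (PySem.List.le_foldl_max t h).2 _ hh
  exact le_antisymm h2 h1

-- ===== VERDICT (by name: the statement is the Claim_ definition above) =====
theorem find_previous_quarter_py_spec : Claim_equal_find_previous_quarter_py := by
  intro fund_entry quarter _
  unfold Spec_find_previous_quarter_py find_previous_quarter_py find_previous_quarter_py_alt
  have hk := pv_key_of_fold quarter fund_entry none
  cases hav : (fund_entry.map Prod.fst).filter (fun q => q ≠ quarter) with
  | nil =>
      rw [hav] at hk
      simp only [Option.map_none, List.foldl_nil] at hk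
      rw [show fund_entry.foldl (fun best p =>
        if p.1 = quarter then best
        else match best with
          | none => some p
          | some b => if b.1 < p.1 then some p else best) none
        = fund_entry.foldl (pvStep quarter) none from rfl]
      rw [Option.map_eq_none_iff.mp hk]
      simp
  | cons h t =>
      rw [hav] at hk
      simp only [Option.map_none, List.foldl_cons] at hk
      rw [pv_fold_some] at hk
      rw [show fund_entry.foldl (fun best p =>
        if p.1 = quarter then best
        else match best with
          | none => some p
          | some b => if b.1 < p.1 then some p else best) none
        = fund_entry.foldl (pvStep quarter) none from rfl]
      cases hfold : fund_entry.foldl (pvStep quarter) none with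
      | none => rw [hfold] at hk; simp at hk
      | some m =>
          rw [hfold] at hk
          simp only [Option.map_some, Option.some.injEq] at hk
          rcases pv_val_of_fold_none quarter fund_entry m hfold with ⟨_, hfind⟩
          simp only [List.isEmpty_cons, Bool.false_eq_true, if_false]
          rw [PySem.List.pyGet?_neg_one, pv_sorted_getLast?, ← hk]
          simp [hfind]
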